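-- pv_equiv track=rewrite | github.com/leonsama/chirrup | chirrup/worker.py | min_swaps_to_target_fast
-- ===== SOURCE A (Python) =====
-- from typing import List, Dict, Optional, Any, Tuple
-- from collections import defaultdict
--
-- def min_swaps_to_target_fast(lst, elements: list[int]):
--     swaps: List[Tuple[int, int]] = []
--     target = sorted(lst)
--
--     # 构建每个字符在 target 中的位置队列
--     pos_map = defaultdict(list)
--     for idx, val in enumerate(lst):
--         pos_map[val].append(idx)
--
--     offsets: List[Tuple[int, int]] = []
--     offset = 0
--
--     for target in elements:
--         if target not in pos_map:
--             offsets.append((offset, offset))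
--             continue
--
--         pos = pos_map[target]
--         target_count = len(pos)
--
--         offsets.append((offset, offset + target_count))
--
--         target_should_move_back_id = [i for i in pos if i >= target_count + offset]
--         target_avaliable_id = [i for i in range(offset, target_count + offset) if i not in pos]
--
--         for k, v in enumerate(target_should_move_back_id):
--             swap = (target_avaliable_id[k], v)
--             swaps.append((target_avaliable_id[k], v))
--             lst[swap[0]], lst[swap[1]] = lst[swap[1]], lst[swap[0]]
--
--         offset += target_count
--         pos_map = defaultdict(list)
--         for idx, val in enumerate(lst[offset:]):
--             pos_map[val].append(idx + offset)
--
--     return swaps, offsets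
-- ===== SOURCE B (Python) =====
-- from collections import Counter
--
-- def min_swaps_to_target_fast(lst, elements: list[int]):
--     # Counts of the untouched suffix are derived from one Counter pass plus a
--     # 'done' set, instead of rebuilding a full position map every iteration;
--     # swaps come from a two-pointer sweep over the current block and the tail.
--     swaps = []
--     offsets = []
--     counts = Counter(lst)
--     done = set()
--     n = len(lst)
--     offset = 0
--     for e in elements:
--         cnt = 0 if e in done else counts.get(e, 0)
--         done.add(e)
--         if cnt == 0:
--             offsets.append((offset, offset))
--             continue
--         offsets.append((offset, offset + cnt))
--         i = offset
--         j = offset + cnt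
--         while True:
--             while i < offset + cnt and lst[i] == e:
--                 i += 1
--             if i >= offset + cnt:
--                 break
--             while lst[j] != e:
--                 j += 1
--             swaps.append((i, j))
--             lst[i], lst[j] = lst[j], lst[i]
--             i += 1
--             j += 1
--         offset += cnt
--     return swaps, offsets
-- ===== Notes on version B (the rewrite author's own statement) =====
-- stated objective: faster
-- what changed: A rebuilds a full value-to-positions dict of the whole remaining suffix after every element and pairs misplaced slots via list comprehensions and repeated indexing; B counts occurrences once with a Counter plus a 'done' set and fills each block with a single in-place two-pointer sweep, never rebuilding any map.
import Mathlib
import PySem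

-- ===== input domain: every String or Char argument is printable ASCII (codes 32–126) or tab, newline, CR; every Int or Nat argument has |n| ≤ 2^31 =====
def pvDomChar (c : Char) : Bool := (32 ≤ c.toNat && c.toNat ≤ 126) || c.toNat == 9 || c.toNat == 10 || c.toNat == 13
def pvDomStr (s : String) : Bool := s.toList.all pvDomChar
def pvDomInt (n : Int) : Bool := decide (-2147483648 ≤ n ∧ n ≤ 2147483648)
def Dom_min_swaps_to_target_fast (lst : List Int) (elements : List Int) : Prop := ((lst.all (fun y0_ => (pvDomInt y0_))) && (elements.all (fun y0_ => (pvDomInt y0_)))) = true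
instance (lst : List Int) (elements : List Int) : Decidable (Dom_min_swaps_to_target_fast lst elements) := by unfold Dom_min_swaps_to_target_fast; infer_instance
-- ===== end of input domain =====

-- B replaces A's per-element rebuild of the whole suffix position map by a one-pass Counter
-- plus a 'done' set and an in-place two-pointer sweep (objective: faster, constant-factor /
-- fewer passes). Python A mutates its 'lst' argument in place; Python B performs the same
-- mutation, and the theorem below is about the returned (swaps, offsets) value.

-- ===== PORT A =====
def pvPosMapSuffix (lst : List Int) (offset : Int) : PySem.Dict Int (List Int) :=
  (PySem.List.enumerate (PySem.List.slice lst (some offset) none) 0).foldl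
    (fun d p => d.modify p.2 [] (· ++ [p.1 + offset])) PySem.Dict.empty

def pvStepA (swaps offsets : List (Int × Int)) (offset : Int) (lst : List Int)
    (posMap : PySem.Dict Int (List Int)) (target : Int) :
    (List (Int × Int)) × (List (Int × Int)) × Int × List Int × PySem.Dict Int (List Int) :=
  if ¬ posMap.contains target then
    (swaps, offsets ++ [(offset, offset)], offset, lst, posMap)
  else
    let pos := posMap.getD target []
    let target_count : Int := pos.length
    let offsets := offsets ++ [(offset, offset + target_count)]
    let mb := pos.filter (fun i => target_count + offset ≤ i)
    let av := (PySem.List.pyRange offset (target_count + offset) 1).filter (fun i => ¬ pos.contains i)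
    let sl := (PySem.List.enumerate mb 0).foldl
      (fun (sl : List (Int × Int) × List Int) kv =>
        match PySem.List.pyGet? av kv.1 with
        | none => sl  -- unreachable: av and mb always have equal length (Python would raise IndexError)
        | some a =>
          (sl.1 ++ [(a, kv.2)],
           PySem.List.pySetD (PySem.List.pySetD sl.2 a (PySem.List.pyGetD sl.2 kv.2 0)) kv.2 (PySem.List.pyGetD sl.2 a 0)))
      (swaps, lst)
    let offset := offset + target_count
    (sl.1, offsets, offset, sl.2, pvPosMapSuffix sl.2 offset)

def min_swaps_to_target_fast (lst : List Int) (elements : List Int) :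
    (List (Int × Int)) × (List (Int × Int)) :=
  -- 'target = sorted(lst)' in the Python is dead code (immediately shadowed) and is omitted
  let posMap := (PySem.List.enumerate lst 0).foldl
    (fun d p => d.modify p.2 [] (· ++ [p.1])) PySem.Dict.empty
  let fin := elements.foldl
    (fun s t => pvStepA s.1 s.2.1 s.2.2.1 s.2.2.2.1 s.2.2.2.2 t)
    (([] : List (Int × Int)), ([] : List (Int × Int)), (0 : Int), lst, posMap)
  (fin.1, fin.2.1)

-- ===== PORT B =====
-- inner 'while i < offset+cnt and lst[i] == e: i += 1'
def pvSkipEq (lst : List Int) (e : Int) (stop i : Nat) : Nat :=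
  if i < stop ∧ lst.getD i 0 = e then pvSkipEq lst e stop (i + 1) else i
termination_by stop - i
decreasing_by omega

-- inner 'while lst[j] != e: j += 1' (the j ≥ len branch is unreachable: Python would raise IndexError)
def pvFindEq (lst : List Int) (e : Int) (j : Nat) : Nat :=
  if j < lst.length then (if lst.getD j 0 = e then j else pvFindEq lst e (j + 1)) else j
termination_by lst.length - j
decreasing_by omega

theorem pvSkipEq_le (lst : List Int) (e : Int) (stop i : Nat) : i ≤ pvSkipEq lst e stop i := by
  fun_induction pvSkipEq <;> omega

-- the 'while True' loop of B: two-pointer sweep swapping misplaced slots with far-away e's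
def pvSweep (lst : List Int) (e : Int) (stop i j : Nat) (swaps : List (Int × Int)) :
    List (Int × Int) × List Int :=
  if _h : pvSkipEq lst e stop i < stop then
    pvSweep
      ((lst.set (pvSkipEq lst e stop i) (lst.getD (pvFindEq lst e j) 0)).set
        (pvFindEq lst e j) (lst.getD (pvSkipEq lst e stop i) 0))
      e stop (pvSkipEq lst e stop i + 1) (pvFindEq lst e j + 1)
      (swaps ++ [((pvSkipEq lst e stop i : Int), (pvFindEq lst e j : Int))])
  else (swaps, lst)
termination_by stop - i
decreasing_by have := pvSkipEq_le lst e stop i; omega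

def pvStepB (counts : PySem.Dict Int Int) (swaps offsets : List (Int × Int))
    (done : PySem.Set Int) (offset : Nat) (lst : List Int) (e : Int) :
    (List (Int × Int)) × (List (Int × Int)) × PySem.Set Int × Nat × List Int :=
  let cnt : Int := if PySem.Set.contains done e then 0 else counts.getD e 0
  let done := PySem.Set.add done e
  if cnt = 0 then
    (swaps, offsets ++ [((offset : Int), (offset : Int))], done, offset, lst)
  else
    let offsets := offsets ++ [((offset : Int), (offset : Int) + cnt)]
    let stop := offset + cnt.toNat
    let sl := pvSweep lst e stop offset stop swaps
    (sl.1, offsets, done, stop, sl.2)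

def min_swaps_to_target_fast_alt (lst : List Int) (elements : List Int) :
    (List (Int × Int)) × (List (Int × Int)) :=
  let counts := PySem.Dict.counter lst
  let fin := elements.foldl
    (fun s e => pvStepB counts s.1 s.2.1 s.2.2.1 s.2.2.2.1 s.2.2.2.2 e)
    (([] : List (Int × Int)), ([] : List (Int × Int)), PySem.Set.empty, (0 : Nat), lst)
  (fin.1, fin.2.1)

-- ===== PRECONDITION & SPEC =====
def Spec_min_swaps_to_target_fast (lst : List Int) (elements : List Int) (out : (List (Int × Int)) × (List (Int × Int))) : Prop := out = min_swaps_to_target_fast_alt lst elements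
instance (lst : List Int) (elements : List Int) (out : (List (Int × Int)) × (List (Int × Int))) : Decidable (Spec_min_swaps_to_target_fast lst elements out) := by unfold Spec_min_swaps_to_target_fast; infer_instance

-- ===== CLAIM (what is proved, stated in full; the proofs are below) =====
def Claim_equal_min_swaps_to_target_fast : Prop := ∀ (lst : List Int) (elements : List Int), Dom_min_swaps_to_target_fast lst elements → Spec_min_swaps_to_target_fast lst elements (min_swaps_to_target_fast lst elements)

-- ===== LEMMAS AND PROOFS =====

-- indices in [i, stop) whose entry is ≠ e ('available' slots of the current window)
def pvBad (l : List Int) (e : Int) (i stop : Nat) : List Nat :=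
  (List.range' i (stop - i)).filter (fun k => !(l.getD k 0 == e))

-- indices in [j, len) whose entry is = e
def pvGood (l : List Int) (e : Int) (j : Nat) : List Nat :=
  (List.range' j (l.length - j)).filter (fun k => l.getD k 0 == e)

-- applying a list of (swap-pair) index pairs in order
def pvApply (ps : List (Nat × Nat)) (l : List Int) : List Int :=
  ps.foldl (fun l p => (l.set p.1 (l.getD p.2 0)).set p.2 (l.getD p.1 0)) l

theorem pvApply_nil (l : List Int) : pvApply [] l = l := rfl

theorem pvApply_cons (p : Nat × Nat) (ps : List (Nat × Nat)) (l : List Int) :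
    pvApply (p :: ps) l = pvApply ps ((l.set p.1 (l.getD p.2 0)).set p.2 (l.getD p.1 0)) := rfl

theorem pvBad_nil (l : List Int) (e : Int) {i stop : Nat} (h : stop ≤ i) : pvBad l e i stop = [] := by
  unfold pvBad
  rw [show stop - i = 0 by omega]
  rfl

theorem pvBad_cons (l : List Int) (e : Int) {i stop : Nat} (h : i < stop) :
    pvBad l e i stop = (if l.getD i 0 == e then [] else [i]) ++ pvBad l e (i + 1) stop := by
  unfold pvBad
  rw [show stop - i = (stop - (i + 1)) + 1 by omega, List.range'_succ]
  by_cases he : l[i]?.getD 0 = e <;>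
    simp [List.getD_eq_getElem?_getD, he]

theorem pvGood_nil (l : List Int) (e : Int) {j : Nat} (h : l.length ≤ j) : pvGood l e j = [] := by
  unfold pvGood
  rw [show l.length - j = 0 by omega]
  rfl

theorem pvGood_cons (l : List Int) (e : Int) {j : Nat} (h : j < l.length) :
    pvGood l e j = (if l.getD j 0 == e then [j] else []) ++ pvGood l e (j + 1) := by
  unfold pvGood
  rw [show l.length - j = (l.length - (j + 1)) + 1 by omega, List.range'_succ]
  by_cases he : l[j]?.getD 0 = e <;>
    simp [List.getD_eq_getElem?_getD, he]

theorem pvBad_congr (l l' : List Int) (e : Int) (i stop : Nat)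
    (h : ∀ k, i ≤ k → k < stop → l'.getD k 0 = l.getD k 0) :
    pvBad l' e i stop = pvBad l e i stop := by
  unfold pvBad
  apply List.filter_congr
  intro k hk
  rw [List.mem_range'] at hk
  obtain ⟨m, hm, rfl⟩ := hk
  rw [h _ (by omega) (by omega)]

theorem pvGood_congr (l l' : List Int) (e : Int) (j : Nat)
    (hlen : l'.length = l.length)
    (h : ∀ k, j ≤ k → k < l.length → l'.getD k 0 = l.getD k 0) :
    pvGood l' e j = pvGood l e j := by
  unfold pvGood
  rw [hlen]
  apply List.filter_congr
  intro k hk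
  rw [List.mem_range'] at hk
  obtain ⟨m, hm, rfl⟩ := hk
  rw [h _ (by omega) (by omega)]

theorem pvSkipEq_spec (l : List Int) (e : Int) (stop i : Nat) (hi : i ≤ stop) :
    pvSkipEq l e stop i ≤ stop ∧
    pvBad l e i stop = pvBad l e (pvSkipEq l e stop i) stop ∧
    (pvSkipEq l e stop i < stop → ¬ (l.getD (pvSkipEq l e stop i) 0 = e)) := by
  revert hi
  fun_induction pvSkipEq l e stop i with
  | case1 i h ih =>
    intro hi
    obtain ⟨h1, h2⟩ := h
    have := ih (by omega)
    refine ⟨this.1, ?_, this.2.2⟩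
    rw [pvBad_cons l e h1, ← this.2.1]
    simp only [List.getD_eq_getElem?_getD] at h2
    simp [h2]
  | case2 i h =>
    intro hi
    refine ⟨hi, rfl, fun hlt => ?_⟩
    intro he
    exact h ⟨hlt, he⟩

theorem pvFindEq_spec (l : List Int) (e : Int) (j : Nat) (h : pvGood l e j ≠ []) :
    pvGood l e j = pvFindEq l e j :: pvGood l e (pvFindEq l e j + 1) ∧
    j ≤ pvFindEq l e j ∧ pvFindEq l e j < l.length ∧ l.getD (pvFindEq l e j) 0 = e := by
  revert h
  fun_induction pvFindEq l e j with
  | case1 j hj he =>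
    intro _
    refine ⟨?_, le_refl _, hj, he⟩
    rw [pvGood_cons l e hj]
    simp only [List.getD_eq_getElem?_getD] at he
    simp [he]
  | case2 j hj he ih =>
    intro h
    simp only [List.getD_eq_getElem?_getD] at he
    have hne : pvGood l e (j + 1) ≠ [] := by
      rw [pvGood_cons l e hj] at h
      simpa [he] using h
    have := ih hne
    exact ⟨by rw [pvGood_cons l e hj]; simpa [he] using this.1, by omega, this.2.2⟩
  | case3 j hj =>
    intro h
    exact absurd (pvGood_nil l e (by omega)) h

theorem getD_set_set (l : List Int) (a b : Nat) (x y : Int) (ha : a < l.length) (hb : b < l.length) (k : Nat) :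
    ((l.set a x).set b y).getD k 0 = if k = b then y else if k = a then x else l.getD k 0 := by
  simp only [List.getD_eq_getElem?_getD]
  by_cases hkb : k = b
  · subst hkb
    rw [List.getElem?_set_self (by simpa using hb)]
    simp
  · rw [List.getElem?_set_ne (fun h => hkb h.symm)]
    by_cases hka : k = a
    · subst hka
      rw [List.getElem?_set_self ha]
      simp [hkb]
    · rw [List.getElem?_set_ne (fun h => hka h.symm)]
      simp [hkb, hka]

theorem count_drop_swap (l : List Int) (a b off : Nat) (ha : a < l.length) (hb : b < l.length)
    (hne : a ≠ b) (hoa : off ≤ a) (hob : off ≤ b) (v : Int) :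
    (((l.set a (l.getD b 0)).set b (l.getD a 0)).drop off).count v = ((l.drop off).count v) := by
  rw [List.drop_set, List.drop_set, if_neg (by omega), if_neg (by omega)]
  set m := l.drop off with hm
  have hma : a - off < m.length := by simp [hm]; omega
  have hmb : b - off < m.length := by simp [hm]; omega
  have hab : a - off ≠ b - off := by omega
  have hxa : l.getD b 0 = m[b - off] := by
    rw [List.getD_eq_getElem l 0 hb]
    show l[b] = (List.drop off l)[b - off]'(by simpa [hm] using hmb)
    rw [List.getElem_drop]
    congr 1; omega
  have hxb : l.getD a 0 = m[a - off] := by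
    rw [List.getD_eq_getElem l 0 ha]
    show l[a] = (List.drop off l)[a - off]'(by simpa [hm] using hma)
    rw [List.getElem_drop]
    congr 1; omega
  rw [hxa, hxb]
  rw [List.count_set (by simpa using hmb), List.count_set hma]
  simp only [List.getElem_set_ne hab]
  by_cases hva : (m[a - off] == v) = true
  · have h1 := List.count_pos_iff.mpr ((beq_iff_eq.mp hva) ▸ List.getElem_mem hma)
    by_cases hvb : (m[b - off] == v) = true <;> simp only [hva, hvb, if_true] <;>
      simp <;> omega
  · by_cases hvb : (m[b - off] == v) = true <;> simp only [hva, hvb, if_true] <;>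
      simp

-- the two-pointer sweep produces exactly the pairing of available window slots with
-- far-away e-positions, and applies exactly those swaps
theorem pvSweep_eq (e : Int) (stop : Nat) (n : Nat) :
    ∀ (l : List Int) (i j : Nat) (swaps : List (Int × Int)),
    stop - i ≤ n → i ≤ stop → stop ≤ j → stop ≤ l.length →
    (pvBad l e i stop).length = (pvGood l e j).length →
    pvSweep l e stop i j swaps =
      (swaps ++ ((pvBad l e i stop).zip (pvGood l e j)).map (fun p => ((p.1 : Int), (p.2 : Int))),
       pvApply ((pvBad l e i stop).zip (pvGood l e j)) l) := by
  induction n with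
  | zero =>
    intro l i j swaps hn hi hj hstop hlen
    have hi0 : stop ≤ i := by omega
    have hskip := pvSkipEq_le l e stop i
    rw [pvSweep, dif_neg (by omega)]
    rw [pvBad_nil l e hi0] at hlen ⊢
    have hg : pvGood l e j = [] := List.length_eq_zero_iff.mp (by simpa using hlen.symm)
    rw [hg]
    simp [pvApply_nil]
  | succ n ih =>
    intro l i j swaps hn hi hj hstop hlen
    obtain ⟨hs1, hs2, hs3⟩ := pvSkipEq_spec l e stop i hi
    rw [pvSweep]
    by_cases hlt : pvSkipEq l e stop i < stop
    · rw [dif_pos hlt]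
      set i' := pvSkipEq l e stop i with hi'def
      have hbad : pvBad l e i' stop = i' :: pvBad l e (i' + 1) stop := by
        rw [pvBad_cons l e hlt]
        have hne := hs3 hlt
        simp only [List.getD_eq_getElem?_getD] at hne
        simp [hne]
      have hgne : pvGood l e j ≠ [] := by
        intro h0
        rw [h0, hs2, hbad] at hlen
        simp at hlen
      obtain ⟨hgood, hjle, hjlt, hje⟩ := pvFindEq_spec l e j hgne
      set j' := pvFindEq l e j with hj'def
      have hil : i' < l.length := by omega
      have hgd : ∀ k, k ≠ i' → k ≠ j' →
          ((l.set i' (l.getD j' 0)).set j' (l.getD i' 0)).getD k 0 = l.getD k 0 := by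
        intro k hk1 hk2
        rw [getD_set_set l i' j' _ _ hil hjlt k, if_neg hk2, if_neg hk1]
      have hlen' : ((l.set i' (l.getD j' 0)).set j' (l.getD i' 0)).length = l.length := by simp
      have hbad' : pvBad ((l.set i' (l.getD j' 0)).set j' (l.getD i' 0)) e (i' + 1) stop
          = pvBad l e (i' + 1) stop :=
        pvBad_congr _ _ _ _ _ (fun k hk1 hk2 => hgd k (by omega) (by omega))
      have hgood' : pvGood ((l.set i' (l.getD j' 0)).set j' (l.getD i' 0)) e (j' + 1)
          = pvGood l e (j' + 1) := by
        refine pvGood_congr _ _ _ _ hlen' (fun k hk1 hk2 => hgd k (by omega) (by omega))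
      have hlen2 : (pvBad ((l.set i' (l.getD j' 0)).set j' (l.getD i' 0)) e (i' + 1) stop).length
          = (pvGood ((l.set i' (l.getD j' 0)).set j' (l.getD i' 0)) e (j' + 1)).length := by
        rw [hbad', hgood']
        rw [hs2, hbad, hgood] at hlen
        simpa using hlen
      rw [ih _ (i' + 1) (j' + 1) _ (by have := pvSkipEq_le l e stop i; omega) (by omega)
        (by omega) (by rw [hlen']; omega) hlen2,
        hbad', hgood', hs2, hbad, hgood, List.zip_cons_cons, List.map_cons, pvApply_cons]
      simp [List.append_assoc]
    · rw [dif_neg hlt]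
      have hi0 : stop ≤ pvSkipEq l e stop i := by omega
      rw [hs2, pvBad_nil l e hi0] at hlen ⊢
      have hg : pvGood l e j = [] := List.length_eq_zero_iff.mp (by simpa using hlen.symm)
      rw [hg]
      simp [pvApply_nil]

theorem pvApply_spec (e : Int) :
    ∀ (bad good : List Nat) (l : List Int),
    bad.length = good.length →
    (∀ a ∈ bad, a < l.length) →
    (∀ b ∈ good, b < l.length ∧ l.getD b 0 = e) →
    bad.Nodup → good.Nodup → (∀ a ∈ bad, ∀ b ∈ good, a ≠ b) →
    (pvApply (bad.zip good) l).length = l.length ∧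
    (∀ a ∈ bad, (pvApply (bad.zip good) l).getD a 0 = e) ∧
    (∀ k, k ∉ bad → k ∉ good → (pvApply (bad.zip good) l).getD k 0 = l.getD k 0) ∧
    (∀ off, (∀ a ∈ bad, off ≤ a) → (∀ b ∈ good, off ≤ b) →
      ∀ v, ((pvApply (bad.zip good) l).drop off).count v = ((l.drop off).count v)) := by
  intro bad
  induction bad with
  | nil =>
    intro good l hlen _ _ _ _ _
    have hg : good = [] := List.length_eq_zero_iff.mp (by simpa using hlen.symm)
    subst hg
    exact ⟨rfl, by simp, fun k _ _ => rfl, fun off _ _ v => rfl⟩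
  | cons a bad ih =>
    intro good l hlen hbadlt hgoodp hnodb hnodg hdisj
    cases good with
    | nil => simp at hlen
    | cons b good' =>
      have hmemb : b ∈ b :: good' := List.mem_cons_self
      have hmema : a ∈ a :: bad := List.mem_cons_self
      have hab : a ≠ b := hdisj a hmema b hmemb
      have hal : a < l.length := hbadlt a hmema
      obtain ⟨hbl, hbe⟩ := hgoodp b hmemb
      have hgd1 : ∀ k, k ≠ a → k ≠ b →
          ((l.set a (l.getD b 0)).set b (l.getD a 0)).getD k 0 = l.getD k 0 := by
        intro k hk1 hk2
        rw [getD_set_set l a b _ _ hal hbl k, if_neg hk2, if_neg hk1]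
      have hl1len : ((l.set a (l.getD b 0)).set b (l.getD a 0)).length = l.length := by simp
      have hanb : a ∉ bad := (List.nodup_cons.mp hnodb).1
      have hbng : b ∉ good' := (List.nodup_cons.mp hnodg).1
      have hang : a ∉ good' := fun hmem => hdisj a hmema a (List.mem_cons_of_mem b hmem) rfl
      have hbnb : b ∉ bad := fun hmem => hdisj b (List.mem_cons_of_mem a hmem) b hmemb rfl
      obtain ⟨ih1, ih2, ih3, ih4⟩ := ih good' ((l.set a (l.getD b 0)).set b (l.getD a 0))
        (by simpa using hlen)
        (fun a' ha' => by rw [hl1len]; exact hbadlt a' (List.mem_cons_of_mem a ha'))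
        (fun b' hb' => by
          have hb'g := hgoodp b' (List.mem_cons_of_mem b hb')
          refine ⟨by rw [hl1len]; exact hb'g.1, ?_⟩
          rw [hgd1 b' (fun h => hdisj a hmema b' (List.mem_cons_of_mem b hb') h.symm)
            (fun h => (List.nodup_cons.mp hnodg).1 (h ▸ hb')), hb'g.2])
        (List.nodup_cons.mp hnodb).2 (List.nodup_cons.mp hnodg).2
        (fun a' ha' b' hb' => hdisj a' (List.mem_cons_of_mem a ha') b' (List.mem_cons_of_mem b hb'))
      rw [List.zip_cons_cons]
      refine ⟨?_, ?_, ?_, ?_⟩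
      · rw [pvApply_cons]; rw [ih1, hl1len]
      · intro a' ha'
        rcases List.mem_cons.mp ha' with rfl | ha'
        · rw [pvApply_cons, ih3 a' hanb hang,
            getD_set_set l a' b _ _ hal hbl a', if_neg hab, if_pos rfl, hbe]
        · rw [pvApply_cons]; exact ih2 a' ha'
      · intro k hk1 hk2
        rw [pvApply_cons, ih3 k (fun h => hk1 (List.mem_cons_of_mem a h))
          (fun h => hk2 (List.mem_cons_of_mem b h)),
          hgd1 k (fun h => hk1 (h ▸ List.mem_cons_self)) (fun h => hk2 (h ▸ List.mem_cons_self))]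
      · intro off hoffb hoffg v
        rw [pvApply_cons, ih4 off (fun a' h => hoffb a' (List.mem_cons_of_mem a h))
          (fun b' h => hoffg b' (List.mem_cons_of_mem b h)) v,
          count_drop_swap l a b off hal hbl hab (hoffb a hmema) (hoffg b hmemb) v]

-- ===== A-side characterisations =====

theorem posMap_getD (l : List Int) (off : Nat) (e : Int) :
    (pvPosMapSuffix l (off : Int)).getD e [] = (pvGood l e off).map (fun k : Nat => (k : Int)) := by
  unfold pvPosMapSuffix
  have h1 := (List.foldl_map (f := fun p : Int × Int => (p.2, p.1 + (off : Int)))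
    (g := fun (d : PySem.Dict Int (List Int)) (q : Int × Int) => d.modify q.1 [] (· ++ [q.2]))
    (l := PySem.List.enumerate (l.drop off) 0) (init := PySem.Dict.empty))
  rw [PySem.List.slice_from_natCast, show
    (fun (d : PySem.Dict Int (List Int)) (p : Int × Int) => d.modify p.2 [] (· ++ [p.1 + (off : Int)]))
      = (fun d p => (fun (d : PySem.Dict Int (List Int)) (q : Int × Int) => d.modify q.1 [] (· ++ [q.2])) d
          ((fun (p : Int × Int) => (p.2, p.1 + (off : Int))) p)) from rfl,
    ← h1, PySem.Dict.getD_foldl_modify_append, PySem.Dict.getD_empty]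
  rw [PySem.List.enumerate_eq_map_pyRange (l.drop off) 0, PySem.List.pyRange_one]
  unfold pvGood
  rw [List.range'_eq_map_range]
  simp only [List.filter_map, List.map_map, List.nil_append, PySem.List.len_eq,
    List.length_drop, Int.sub_zero, Int.toNat_natCast]
  have hfil : List.filter
        ((fun (p : Int × Int) => p.1 == e) ∘
          (fun (p : Int × Int) => (p.2, p.1 + (off : Int))) ∘
            (fun j => (j, PySem.List.pyGetD (List.drop off l) j 0)) ∘ fun k : Nat => 0 + (k : Int))
        (List.range (l.length - off))
      = List.filter ((fun k : Nat => l.getD k 0 == e) ∘ fun x => off + x)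
        (List.range (l.length - off)) := by
    apply List.filter_congr
    intro q hq
    simp only [Function.comp_apply, zero_add, PySem.List.pyGetD_natCast]
    rw [List.getD_eq_getElem?_getD, List.getD_eq_getElem?_getD, List.getElem?_drop]
  rw [hfil]
  apply List.map_congr_left
  intro q hq
  simp only [Function.comp_apply, zero_add]
  push_cast
  ring

theorem posMap_contains (l : List Int) (off : Nat) (e : Int) :
    (pvPosMapSuffix l (off : Int)).contains e = true ↔ (l.drop off).count e ≠ 0 := by
  unfold pvPosMapSuffix
  have h1 := (List.foldl_map (f := fun p : Int × Int => (p.2, p.1 + (off : Int)))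
    (g := fun (d : PySem.Dict Int (List Int)) (q : Int × Int) => d.modify q.1 [] (· ++ [q.2]))
    (l := PySem.List.enumerate (l.drop off) 0) (init := PySem.Dict.empty))
  rw [PySem.List.slice_from_natCast, show
    (fun (d : PySem.Dict Int (List Int)) (p : Int × Int) => d.modify p.2 [] (· ++ [p.1 + (off : Int)]))
      = (fun d p => (fun (d : PySem.Dict Int (List Int)) (q : Int × Int) => d.modify q.1 [] (· ++ [q.2])) d
          ((fun (p : Int × Int) => (p.2, p.1 + (off : Int))) p)) from rfl,
    ← h1, PySem.Dict.contains_iff_mem_keys,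
    PySem.Dict.keys_foldl_modify_key _ Prod.fst [] (fun _ q v => v ++ [q.2])]
  have hmap : (((PySem.List.enumerate (l.drop off) 0).map (fun p => (p.2, p.1 + (off : Int)))).map Prod.fst)
      = l.drop off := by
    rw [List.map_map]
    exact PySem.List.map_snd_enumerate (l.drop off) 0
  rw [hmap]
  have hupd : PySem.Set.update (PySem.Dict.keys (PySem.Dict.empty : PySem.Dict Int (List Int))) (l.drop off)
      = PySem.Set.ofList (l.drop off) := by
    rw [PySem.Dict.keys_empty, PySem.Set.ofList_eq_foldl]
    rfl
  rw [hupd]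
  rw [PySem.Set.mem_ofList]
  constructor
  · intro hmem h0
    exact (List.count_eq_zero.mp h0) hmem
  · intro h0
    by_contra hmem
    exact h0 (List.count_eq_zero.mpr hmem)

theorem initial_posMap (l : List Int) :
    (PySem.List.enumerate l 0).foldl (fun d p => d.modify p.2 [] (· ++ [p.1])) PySem.Dict.empty
      = pvPosMapSuffix l ((0 : Nat) : Int) := by
  unfold pvPosMapSuffix
  simp

theorem pvGood_length (l : List Int) (e : Int) (off : Nat) :
    (pvGood l e off).length = (l.drop off).count e := by
  have hdrop : (List.range' off (l.length - off)).map (fun k => l.getD k 0) = l.drop off := by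
    apply List.ext_getElem
    · simp
    · intro i h1 h2
      simp only [List.getElem_map, List.getElem_range', List.getElem_drop]
      rw [show off + 1 * i = off + i by omega,
        List.getD_eq_getElem l 0 (by simp at h2; omega)]
  rw [pvGood, ← List.countP_eq_length_filter, ← hdrop, List.count_eq_countP, List.countP_map]
  rfl

theorem pvGood_split (l : List Int) (e : Int) (off stop : Nat) (h1 : off ≤ stop) (h2 : stop ≤ l.length) :
    pvGood l e off = (List.range' off (stop - off)).filter (fun k => l.getD k 0 == e) ++ pvGood l e stop := by
  unfold pvGood
  rw [show l.length - off = (stop - off) + (l.length - stop) by omega,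
    ← List.range'_append (step := 1), List.filter_append,
    show off + 1 * (stop - off) = stop by omega]

-- A's inner enumerate/index loop is the zip of the two index lists
theorem foldA_eq :
    ∀ (good bad pre : List Nat) (swaps : List (Int × Int)) (l : List Int),
    bad.length = good.length →
    ((PySem.List.enumerate (good.map (fun k : Nat => (k : Int))) (pre.length : Int)).foldl
      (fun (sl : List (Int × Int) × List Int) kv =>
        match PySem.List.pyGet? ((pre ++ bad).map (fun k : Nat => (k : Int))) kv.1 with
        | none => sl
        | some a =>
          (sl.1 ++ [(a, kv.2)],
           PySem.List.pySetD (PySem.List.pySetD sl.2 a (PySem.List.pyGetD sl.2 kv.2 0)) kv.2 (PySem.List.pyGetD sl.2 a 0)))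
      (swaps, l)) =
      (swaps ++ (bad.zip good).map (fun p : Nat × Nat => ((p.1 : Int), (p.2 : Int))),
       pvApply (bad.zip good) l) := by
  intro good
  induction good with
  | nil =>
    intro bad pre swaps l hlen
    have hb : bad = [] := List.length_eq_zero_iff.mp hlen
    subst hb
    simp [pvApply_nil]
  | cons g gs ih =>
    intro bad pre swaps l hlen
    cases bad with
    | nil => simp at hlen
    | cons b bs =>
      rw [List.map_cons, PySem.List.enumerate_cons, List.foldl_cons]
      have hget : PySem.List.pyGet? ((pre ++ b :: bs).map (fun k : Nat => (k : Int))) ((pre.length : Nat) : Int)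
          = some ((b : Nat) : Int) := by
        rw [PySem.List.pyGet?_natCast, List.map_append,
          List.getElem?_append_right (by simp)]
        simp
      simp only [hget, PySem.List.pySetD_natCast, PySem.List.pyGetD_natCast]
      rw [show ((pre.length : Int) + 1) = (((pre ++ [b]).length : Nat) : Int) by simp,
        show pre ++ b :: bs = (pre ++ [b]) ++ bs from by simp,
        ih bs (pre ++ [b]) (swaps ++ [(((b : Nat) : Int), ((g : Nat) : Int))]) _ (by simpa using hlen),
        List.zip_cons_cons, List.map_cons, pvApply_cons]
      simp

theorem length_filter_not (p : Nat → Bool) (xs : List Nat) :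
    (xs.filter p).length + (xs.filter (fun a => !p a)).length = xs.length := by
  induction xs with
  | nil => rfl
  | cons x xs ih =>
    by_cases hx : p x <;> simp [hx] <;> omega

-- ===== the step correspondence =====

def pvInv (lst0 : List Int)
    (a : (List (Int × Int)) × (List (Int × Int)) × Int × List Int × PySem.Dict Int (List Int))
    (b : (List (Int × Int)) × (List (Int × Int)) × PySem.Set Int × Nat × List Int) : Prop :=
  a.1 = b.1 ∧ a.2.1 = b.2.1 ∧ a.2.2.1 = ((b.2.2.2.1 : Nat) : Int) ∧ a.2.2.2.1 = b.2.2.2.2 ∧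
  a.2.2.2.2 = pvPosMapSuffix b.2.2.2.2 ((b.2.2.2.1 : Nat) : Int) ∧
  b.2.2.2.1 ≤ b.2.2.2.2.length ∧
  (∀ v, v ∈ b.2.2.1 → (b.2.2.2.2.drop b.2.2.2.1).count v = 0) ∧
  (∀ v, v ∉ b.2.2.1 → (b.2.2.2.2.drop b.2.2.2.1).count v = lst0.count v)

theorem pvStep_corr (lst0 : List Int) (swA ofA : List (Int × Int)) (offA : Int) (lA : List Int)
    (pmA : PySem.Dict Int (List Int)) (swB ofB : List (Int × Int)) (dn : PySem.Set Int)
    (off : Nat) (lc : List Int)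
    (h : pvInv lst0 (swA, ofA, offA, lA, pmA) (swB, ofB, dn, off, lc)) (t : Int) :
    pvInv lst0 (pvStepA swA ofA offA lA pmA t)
      (pvStepB (PySem.Dict.counter lst0) swB ofB dn off lc t) := by
  unfold pvInv at h
  obtain ⟨h1, h2, h3, h4, h5, h6, h7, h8⟩ := h
  dsimp only at h1 h2 h3 h4 h5 h6 h7 h8
  rw [h1, h2, h3, h4, h5]
  clear h1 h2 h3 h4 h5
  -- the count of t in the untouched suffix
  have hcnt : (if PySem.Set.contains dn t then (0 : Int) else (PySem.Dict.counter lst0).getD t 0)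
      = (((lc.drop off).count t : Nat) : Int) := by
    by_cases hmem : t ∈ dn
    · rw [if_pos (PySem.Set.contains_iff dn t |>.mpr hmem), h7 t hmem]
      simp
    · rw [if_neg (fun hc => hmem ((PySem.Set.contains_iff dn t).mp hc)),
        PySem.Dict.getD_counter, h8 t hmem]
  by_cases hc0 : (lc.drop off).count t = 0
  · -- t absent from the suffix: both sides only record an empty block
    have hnc : ¬ (pvPosMapSuffix lc (off : Int)).contains t = true := by
      rw [posMap_contains]
      omega
    rw [pvStepA, if_pos hnc, pvStepB]
    rw [hcnt]
    rw [if_pos (by rw [hc0]; simp)]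
    refine ⟨rfl, rfl, rfl, rfl, rfl, h6, ?_, ?_⟩
    · intro v hv
      rcases (PySem.Set.mem_add dn t v).mp hv with hv' | rfl
      · exact h7 v hv'
      · exact hc0
    · intro v hv
      exact h8 v (fun hv' => hv ((PySem.Set.mem_add dn t v).mpr (Or.inl hv')))
  · -- t occurs in the suffix: both sides emit the same block and the same swaps
    set c := (lc.drop off).count t with hcdef
    have hcpos : 0 < c := Nat.pos_of_ne_zero hc0
    have hclen : c ≤ lc.length - off := by
      have := List.count_le_length (a := t) (l := lc.drop off)
      simpa [← hcdef] using this
    have hcont : (pvPosMapSuffix lc (off : Int)).contains t = true := (posMap_contains lc off t).mpr hc0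
    have hGlen : (pvGood lc t off).length = c := pvGood_length lc t off
    rw [pvStepA, if_neg (not_not_intro hcont), pvStepB, hcnt, if_neg (by exact_mod_cast hc0)]
    simp only [posMap_getD, List.length_map, hGlen, Int.toNat_natCast]
    have hsplit := pvGood_split lc t off (off + c) (by omega) (by omega)
    have hmemW : ∀ k ∈ (List.range' off (off + c - off)).filter (fun k => lc.getD k 0 == t),
        k < off + c := by
      intro k hk
      have hk' := (List.mem_filter.mp hk).1
      rw [List.mem_range'] at hk'
      obtain ⟨i, hi, rfl⟩ := hk'
      omega
    have hmemM : ∀ k ∈ pvGood lc t (off + c), off + c ≤ k ∧ k < lc.length ∧ lc.getD k 0 = t := by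
      intro k hk
      unfold pvGood at hk
      have h1 := (List.mem_filter.mp hk).1
      have h2 := (List.mem_filter.mp hk).2
      rw [List.mem_range'] at h1
      obtain ⟨i, hi, rfl⟩ := h1
      exact ⟨by omega, by omega, by simpa using h2⟩
    have hmemB : ∀ k ∈ pvBad lc t off (off + c), off ≤ k ∧ k < off + c ∧ ¬ lc.getD k 0 = t := by
      intro k hk
      unfold pvBad at hk
      have h1 := (List.mem_filter.mp hk).1
      have h2 := (List.mem_filter.mp hk).2
      rw [List.mem_range'] at h1
      obtain ⟨i, hi, rfl⟩ := h1
      exact ⟨by omega, by omega, by simpa using h2⟩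
    have hmb : List.filter (fun i => decide ((c : Int) + (off : Int) ≤ i))
          (List.map (fun k : Nat => (k : Int)) (pvGood lc t off))
        = List.map (fun k : Nat => (k : Int)) (pvGood lc t (off + c)) := by
      rw [List.filter_map, hsplit, List.filter_append]
      have e1 : List.filter ((fun i => decide ((c : Int) + (off : Int) ≤ i)) ∘ (fun k : Nat => (k : Int)))
          ((List.range' off (off + c - off)).filter (fun k => lc.getD k 0 == t)) = [] := by
        apply List.filter_eq_nil_iff.mpr
        intro k hk
        have hkb := hmemW k hk
        simp only [Function.comp_apply, decide_eq_true_eq]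
        omega
      have e2 : List.filter ((fun i => decide ((c : Int) + (off : Int) ≤ i)) ∘ (fun k : Nat => (k : Int)))
          (pvGood lc t (off + c)) = pvGood lc t (off + c) := by
        apply List.filter_eq_self.mpr
        intro k hk
        have hkb := (hmemM k hk).1
        simp only [Function.comp_apply, decide_eq_true_eq]
        omega
      rw [e1, e2, List.nil_append]
    have hpyr : PySem.List.pyRange (off : Int) ((c : Int) + (off : Int)) 1
        = List.map (fun k : Nat => (k : Int)) (List.range' off c) := by
      rw [PySem.List.pyRange_one, List.range'_eq_map_range, List.map_map]
      rw [show ((c : Int) + (off : Int) - (off : Int)).toNat = c by omega]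
      apply List.map_congr_left
      intro q hq
      simp only [Function.comp_apply]
      push_cast
      ring
    have hcontmem : ∀ k : Nat, off ≤ k → k < off + c →
        ((List.map (fun k : Nat => (k : Int)) (pvGood lc t off)).contains (k : Int) = true
          ↔ lc.getD k 0 = t) := by
      intro k hk1 hk2
      have hciff : ∀ (L : List Int) (x : Int), (L.contains x = true) ↔ x ∈ L := fun L x => by simp
      rw [hciff]
      constructor
      · intro hmem
        rw [List.mem_map] at hmem
        obtain ⟨m, hm, hmk⟩ := hmem
        have hmkeq : m = k := by exact_mod_cast hmk
        subst hmkeq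
        unfold pvGood at hm
        simpa using (List.mem_filter.mp hm).2
      · intro hgd
        rw [List.mem_map]
        refine ⟨k, ?_, rfl⟩
        unfold pvGood
        rw [List.mem_filter]
        exact ⟨List.mem_range'.mpr ⟨k - off, by omega, by omega⟩, by simpa using hgd⟩
    have hav : List.filter
          (fun i => decide ¬(List.map (fun k : Nat => (k : Int)) (pvGood lc t off)).contains i = true)
          (PySem.List.pyRange (off : Int) ((c : Int) + (off : Int)) 1)
        = List.map (fun k : Nat => (k : Int)) (pvBad lc t off (off + c)) := by
      rw [hpyr, List.filter_map]
      unfold pvBad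
      rw [show off + c - off = c by omega]
      congr 1
      apply List.filter_congr
      intro k hk
      rw [List.mem_range'] at hk
      obtain ⟨i, hi, rfl⟩ := hk
      simp only [Function.comp_apply]
      have hiff := hcontmem (off + 1 * i) (by omega) (by omega)
      by_cases hgd : lc.getD (off + 1 * i) 0 = t
      · have hgd' : lc[off + i]?.getD 0 = t := by simpa using hgd
        rw [hiff.mpr hgd]
        simp [hgd']
      · have hgd' : ¬ lc[off + i]?.getD 0 = t := by simpa using hgd
        rw [Bool.eq_false_iff.mpr (fun hx => hgd (hiff.mp hx))]
        simp [hgd']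
    have hWM : ((List.range' off (off + c - off)).filter (fun k => lc.getD k 0 == t)).length
        + (pvGood lc t (off + c)).length = c := by
      have hsl := congrArg List.length hsplit
      rw [List.length_append] at hsl
      omega
    have hcompl : ((List.range' off (off + c - off)).filter (fun k => lc.getD k 0 == t)).length
        + (pvBad lc t off (off + c)).length = off + c - off := by
      unfold pvBad
      have := length_filter_not (fun k => lc.getD k 0 == t) (List.range' off (off + c - off))
      rw [List.length_range'] at this
      exact this
    have hlenBG : (pvBad lc t off (off + c)).length = (pvGood lc t (off + c)).length := by omega
    have hfold := foldA_eq (pvGood lc t (off + c)) (pvBad lc t off (off + c)) [] swB lc hlenBG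
    simp only [List.nil_append, List.length_nil, Nat.cast_zero] at hfold
    simp only [hmb, hav]
    rw [hfold,
      pvSweep_eq t (off + c) (off + c) lc off (off + c) swB (by omega) (by omega) (by omega)
        (by omega) hlenBG]
    -- properties of the swapped list
    obtain ⟨hA1, hA2, hA3, hA4⟩ := pvApply_spec t (pvBad lc t off (off + c)) (pvGood lc t (off + c)) lc
      hlenBG (fun a ha => by have := hmemB a ha; omega)
      (fun b hb => ⟨(hmemM b hb).2.1, (hmemM b hb).2.2⟩)
      (List.Nodup.filter _ (List.nodup_range' 1 (by norm_num)))
      (List.Nodup.filter _ (List.nodup_range' 1 (by norm_num)))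
      (fun a ha b hb => by have := hmemB a ha; have := hmemM b hb; omega)
    set lz := pvApply ((pvBad lc t off (off + c)).zip (pvGood lc t (off + c))) lc with hlz
    have hwin : ∀ k, off ≤ k → k < off + c → lz.getD k 0 = t := by
      intro k hk1 hk2
      by_cases hkt : lc.getD k 0 = t
      · rw [hA3 k (fun hmem => (hmemB k hmem).2.2 hkt) (fun hmem => by have := hmemM k hmem; omega)]
        exact hkt
      · refine hA2 k ?_
        unfold pvBad
        rw [List.mem_filter]
        exact ⟨List.mem_range'.mpr ⟨k - off, by omega, by omega⟩, by simpa using hkt⟩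
    have hrep : (lz.drop off).take c = List.replicate c t := by
      rw [List.eq_replicate_iff]
      constructor
      · rw [List.length_take, List.length_drop, hA1]
        omega
      · intro x hx
        rw [List.mem_iff_getElem] at hx
        obtain ⟨q, hq, rfl⟩ := hx
        rw [List.getElem_take, List.getElem_drop]
        rw [List.length_take, List.length_drop, hA1] at hq
        rw [← List.getD_eq_getElem lz 0 (by omega)]
        exact hwin (off + q) (by omega) (by omega)
    have hdropsplit : ∀ v : Int, (lz.drop off).count v
        = (if v = t then c else 0) + (lz.drop (off + c)).count v := by
      intro v
      conv_lhs => rw [← List.take_append_drop c (lz.drop off)]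
      rw [List.count_append, hrep, List.drop_drop, List.count_replicate]
      by_cases hvt : v = t
      · simp [hvt]
      · simp [hvt]
        intro h
        exact absurd h.symm hvt
    have hcnt4 := hA4 off (fun a ha => (hmemB a ha).1) (fun b hb => by have := hmemM b hb; omega)
    -- assemble the invariant
    unfold pvInv
    dsimp only
    refine ⟨rfl, rfl, by push_cast; ring, rfl, ?_, ?_, ?_, ?_⟩
    · rw [show ((off : Int) + (c : Int)) = (((off + c : Nat)) : Int) by push_cast; ring]
    · rw [hA1]
      omega
    · intro v hv
      rcases (PySem.Set.mem_add dn t v).mp hv with hv' | rfl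
      · have h0 : (lc.drop off).count v = 0 := h7 v hv'
        have hx := hdropsplit v
        rw [hcnt4 v, h0] at hx
        by_cases hvt : v = t
        · subst hvt
          omega
        · rw [if_neg hvt] at hx
          omega
      · have hx := hdropsplit v
        rw [hcnt4 v, if_pos rfl, ← hcdef] at hx
        omega
    · intro v hv
      have hvd : v ∉ dn := fun h' => hv ((PySem.Set.mem_add dn t v).mpr (Or.inl h'))
      have hvt : v ≠ t := fun h' => hv ((PySem.Set.mem_add dn t v).mpr (Or.inr h'))
      have hx := hdropsplit v
      rw [hcnt4 v, if_neg hvt, h8 v hvd] at hx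
      omega

-- ===== VERDICT (by name: the statement is the Claim_ definition above) =====
theorem min_swaps_to_target_fast_spec : Claim_equal_min_swaps_to_target_fast := by
  intro lst elements hdom
  clear hdom
  unfold Spec_min_swaps_to_target_fast min_swaps_to_target_fast min_swaps_to_target_fast_alt
  have key : ∀ (sa : (List (Int × Int)) × (List (Int × Int)) × Int × List Int × PySem.Dict Int (List Int))
      (sb : (List (Int × Int)) × (List (Int × Int)) × PySem.Set Int × Nat × List Int),
      pvInv lst sa sb →
      pvInv lst
        (elements.foldl (fun s t => pvStepA s.1 s.2.1 s.2.2.1 s.2.2.2.1 s.2.2.2.2 t) sa)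
        (elements.foldl (fun s e => pvStepB (PySem.Dict.counter lst) s.1 s.2.1 s.2.2.1 s.2.2.2.1 s.2.2.2.2 e) sb) := by
    induction elements with
    | nil => intro sa sb h; exact h
    | cons t ts ih =>
      intro sa sb h
      simp only [List.foldl_cons]
      exact ih (pvStepA sa.1 sa.2.1 sa.2.2.1 sa.2.2.2.1 sa.2.2.2.2 t)
        (pvStepB (PySem.Dict.counter lst) sb.1 sb.2.1 sb.2.2.1 sb.2.2.2.1 sb.2.2.2.2 t)
        (pvStep_corr lst sa.1 sa.2.1 sa.2.2.1 sa.2.2.2.1 sa.2.2.2.2 sb.1 sb.2.1 sb.2.2.1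
          sb.2.2.2.1 sb.2.2.2.2 h t)
  have h0 : pvInv lst
      (([] : List (Int × Int)), ([] : List (Int × Int)), (0 : Int), lst,
        (PySem.List.enumerate lst 0).foldl (fun d p => d.modify p.2 [] (· ++ [p.1])) PySem.Dict.empty)
      (([] : List (Int × Int)), ([] : List (Int × Int)), PySem.Set.empty, (0 : Nat), lst) := by
    refine ⟨rfl, rfl, rfl, rfl, initial_posMap lst, by simp, ?_, ?_⟩
    · intro v hv; simp [PySem.Set.empty] at hv
    · intro v _; simp
  have := key _ _ h0
  obtain ⟨h1, h2, -⟩ := this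
  simp only []
  rw [h1, h2]
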